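-- pv_equiv track=rewrite | github.com/swifttl/Advent_of_Code_2015 | Day5pt1.py | forbidCheck
-- ===== SOURCE A (Python) =====
-- forbiddenArray = ['ab', 'cd', 'pq', 'xy']
--
-- def forbidCheck(line):
--     naughtyORnice = "nice"
--     for i in forbiddenArray:
--         if i in line:
--             naughtyORnice = "naughty"
--     if naughtyORnice == "nice":
--         return True
--     else:
--         return False
-- ===== SOURCE B (Python) =====
-- def forbidCheck(line):
--     # single left-to-right pass over adjacent character pairs
--     bad = {('a', 'b'), ('c', 'd'), ('p', 'q'), ('x', 'y')}
--     return all((x, y) not in bad for x, y in zip(line, line[1:]))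
-- ===== Notes on version B (the rewrite author's own statement) =====
-- stated objective: alternative
-- what changed: B makes one left-to-right pass over adjacent character pairs and tests each pair against a set, instead of A's four separate substring scans of the whole line.
import Mathlib
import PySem

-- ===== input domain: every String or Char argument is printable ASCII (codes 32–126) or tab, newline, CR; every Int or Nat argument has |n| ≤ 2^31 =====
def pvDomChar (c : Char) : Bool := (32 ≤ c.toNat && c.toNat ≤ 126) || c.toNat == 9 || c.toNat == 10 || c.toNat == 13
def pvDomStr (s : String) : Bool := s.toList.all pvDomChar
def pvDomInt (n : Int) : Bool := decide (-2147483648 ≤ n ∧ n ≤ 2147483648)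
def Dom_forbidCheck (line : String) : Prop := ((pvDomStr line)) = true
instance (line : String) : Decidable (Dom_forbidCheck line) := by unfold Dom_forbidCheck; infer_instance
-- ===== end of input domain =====

-- B replaces A's four whole-line substring scans by one pass over adjacent character pairs (alternative, same cost class).

-- ===== PORT A =====
def forbiddenArray : List String := ["ab", "cd", "pq", "xy"]

def forbidCheck (line : String) : Bool :=
  let naughtyORnice :=
    forbiddenArray.foldl (fun acc i => if PySem.Str.isIn i line then "naughty" else acc) "nice"
  if naughtyORnice == "nice" then true else false

-- ===== PORT B =====
-- (x, y) in the bad-pair set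
def badPair (x y : Char) : Bool :=
  (x, y) ∈ [('a', 'b'), ('c', 'd'), ('p', 'q'), ('x', 'y')]

-- all((x, y) not in bad for x, y in zip(line, line[1:])): one pass over adjacent pairs
def pairScan : List Char → Bool
  | x :: y :: rest => if badPair x y then false else pairScan (y :: rest)
  | _ => true

def forbidCheck_alt (line : String) : Bool := pairScan line.toList

-- ===== PRECONDITION & SPEC =====
def Spec_forbidCheck (line : String) (out : Bool) : Prop := out = forbidCheck_alt line
instance (line : String) (out : Bool) : Decidable (Spec_forbidCheck line out) := by unfold Spec_forbidCheck; infer_instance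

-- ===== CLAIM (what is proved, stated in full; the proofs are below) =====
def Claim_equal_forbidCheck : Prop := ∀ (line : String), Dom_forbidCheck line → Spec_forbidCheck line (forbidCheck line)

-- ===== LEMMAS AND PROOFS =====

-- a two-character pattern sits in a list iff it is the head pair or sits in the tail
lemma pair_infix_cons_cons (u v a b : Char) (s : List Char) :
    [u, v] <:+: (a :: b :: s) ↔ (u = a ∧ v = b) ∨ [u, v] <:+: (b :: s) := by
  rw [List.infix_cons_iff]; simp [List.cons_prefix_cons]

lemma pair_not_infix_short (u v a : Char) : ¬ ([u, v] <:+: [a]) := by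
  intro h; have := h.length_le; simp at this

-- the forbidden-substring condition, as one proposition
def HasForbidden (l : List Char) : Prop :=
  ['a','b'] <:+: l ∨ ['c','d'] <:+: l ∨ ['p','q'] <:+: l ∨ ['x','y'] <:+: l

lemma pairScan_eq_true_iff (l : List Char) : pairScan l = true ↔ ¬ HasForbidden l := by
  fun_induction pairScan l with
  | case1 x y rest h =>
    constructor
    · intro hfalse; exact absurd hfalse (by simp)
    · intro hno
      exfalso; apply hno
      simp only [badPair, List.mem_cons, Prod.mk.injEq, List.not_mem_nil, or_false,
        decide_eq_true_eq] at h
      unfold HasForbidden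
      rcases h with ⟨hx, hy⟩ | ⟨hx, hy⟩ | ⟨hx, hy⟩ | ⟨hx, hy⟩ <;> subst hx <;> subst hy
      · exact Or.inl ⟨[], rest, rfl⟩
      · exact Or.inr (Or.inl ⟨[], rest, rfl⟩)
      · exact Or.inr (Or.inr (Or.inl ⟨[], rest, rfl⟩))
      · exact Or.inr (Or.inr (Or.inr ⟨[], rest, rfl⟩))
  | case2 x y rest h ih =>
    simp only [badPair, List.mem_cons, Prod.mk.injEq, List.not_mem_nil, or_false,
      decide_eq_true_eq, not_or] at h
    push_neg at h
    obtain ⟨h1, h2, h3, h4⟩ := h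
    rw [ih]
    unfold HasForbidden
    simp only [pair_infix_cons_cons]
    constructor
    · intro hno hc
      apply hno
      rcases hc with (⟨hx, hy⟩ | hc) | (⟨hx, hy⟩ | hc) | (⟨hx, hy⟩ | hc) | (⟨hx, hy⟩ | hc)
      · exact absurd hy.symm (h1 hx.symm)
      · exact Or.inl hc
      · exact absurd hy.symm (h2 hx.symm)
      · exact Or.inr (Or.inl hc)
      · exact absurd hy.symm (h3 hx.symm)
      · exact Or.inr (Or.inr (Or.inl hc))
      · exact absurd hy.symm (h4 hx.symm)
      · exact Or.inr (Or.inr (Or.inr hc))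
    · intro hno hc
      apply hno
      rcases hc with hc | hc | hc | hc
      · exact Or.inl (Or.inr hc)
      · exact Or.inr (Or.inl (Or.inr hc))
      · exact Or.inr (Or.inr (Or.inl (Or.inr hc)))
      · exact Or.inr (Or.inr (Or.inr (Or.inr hc)))
  | case3 l h =>
    simp only [true_iff]
    intro hc
    cases l with
    | nil =>
      unfold HasForbidden at hc
      rcases hc with hc | hc | hc | hc <;> · have := hc.length_le; simp at this
    | cons a t =>
      cases t with
      | nil =>
        unfold HasForbidden at hc
        rcases hc with hc | hc | hc | hc <;> exact pair_not_infix_short _ _ _ hc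
      | cons b r => exact h a b r rfl

lemma forbidCheck_eq (line : String) :
    forbidCheck line =
      !(PySem.Chars.isIn ['a','b'] line.toList || PySem.Chars.isIn ['c','d'] line.toList ||
        PySem.Chars.isIn ['p','q'] line.toList || PySem.Chars.isIn ['x','y'] line.toList) := by
  unfold forbidCheck forbiddenArray
  cases h1 : PySem.Chars.isIn ['a','b'] line.toList <;>
  cases h2 : PySem.Chars.isIn ['c','d'] line.toList <;>
  cases h3 : PySem.Chars.isIn ['p','q'] line.toList <;>
  cases h4 : PySem.Chars.isIn ['x','y'] line.toList <;>
  simp [List.foldl, h1, h2, h3, h4]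

lemma forbidCheck_eq_true_iff (line : String) :
    forbidCheck line = true ↔ ¬ HasForbidden line.toList := by
  rw [forbidCheck_eq]
  unfold HasForbidden
  simp only [Bool.not_eq_true', Bool.or_eq_false_iff, PySem.Chars.isIn_eq_false_iff]
  tauto

-- ===== VERDICT (by name: the statement is the Claim_ definition above) =====
theorem forbidCheck_spec : Claim_equal_forbidCheck := by
  intro line _
  unfold Spec_forbidCheck forbidCheck_alt
  cases hp : pairScan line.toList with
  | true =>
    rw [← hp] at *
    rw [Bool.eq_iff_iff, forbidCheck_eq_true_iff, hp, ← pairScan_eq_true_iff, hp]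
  | false =>
    rw [Bool.eq_false_iff]
    intro hA
    have h1 := (forbidCheck_eq_true_iff line).1 hA
    have h2 : pairScan line.toList = true := (pairScan_eq_true_iff _).2 h1
    rw [hp] at h2; exact Bool.false_ne_true h2
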